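-- pv_equiv track=rewrite | github.com/bhushansalunke/DailyPythonPractise | d6_p1.py | jugglerSequence
-- ===== SOURCE A (Python) =====
-- def integer_square_root(x):
--     """Calculate the integer square root of x without using math functions."""
--     if x < 0:
--         raise ValueError("Cannot compute square root of a negative number.")
--     if x == 0:
--         return 0
--     # Start checking from 1 upwards
--     for i in range(1, x + 1):
--         if i * i > x:
--             return i - 1  # Return the largest integer whose square is <= x
--
-- def jugglerSequence(n):
--     sequence = []  # Create an empty list to store the sequence
--
--     while n > 1:  # Continue until n becomes 1
--         sequence.append(n)  # Add the current n to the sequence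
--         if n % 2 == 0:  # Check if n is even
--             n = integer_square_root(n)  # Get the integer square root of n
--         else:  # If n is odd
--             n = integer_square_root(n * n * n)  # Get the integer square root of n^3
--
--     sequence.append(1)  # Finally, add 1 to the sequence
--     return sequence  # Return the complete sequence
-- ===== SOURCE B (Python) =====
-- def _bsqrt(x):
--     """Largest r with r*r <= x, by binary search (x >= 0)."""
--     lo, hi = 0, x
--     while lo < hi:
--         mid = (lo + hi + 1) // 2
--         if mid * mid <= x:
--             lo = mid
--         else:
--             hi = mid - 1
--     return lo
--
-- def jugglerSequence(n):
--     if n <= 1: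
--         return [1]
--     return [n] + jugglerSequence(_bsqrt(n if n % 2 == 0 else n * n * n))
-- ===== Notes on version B (the rewrite author's own statement) =====
-- stated objective: alternative
-- what changed: Replaces the linear scan 1..x for the integer square root by a binary search on [0,x], and builds the sequence by direct recursion instead of a while loop with append.
import Mathlib
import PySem

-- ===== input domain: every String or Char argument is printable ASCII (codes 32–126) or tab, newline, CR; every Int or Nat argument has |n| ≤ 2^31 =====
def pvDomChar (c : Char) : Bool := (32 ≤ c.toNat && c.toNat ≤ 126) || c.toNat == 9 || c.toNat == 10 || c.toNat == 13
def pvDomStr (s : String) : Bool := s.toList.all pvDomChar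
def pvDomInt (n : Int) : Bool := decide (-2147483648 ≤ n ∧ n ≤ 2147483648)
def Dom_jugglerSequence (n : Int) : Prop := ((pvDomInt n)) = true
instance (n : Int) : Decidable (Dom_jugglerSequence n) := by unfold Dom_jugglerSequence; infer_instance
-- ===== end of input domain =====

-- B replaces A's linear-scan integer square root by a binary search and builds the
-- sequence by direct recursion instead of a while loop with append (objective: alternative).
-- Both ports bound the (empirically short) juggler loop by the same fuel constant.

-- ===== PORT A =====
-- 'for i in range(1, x+1): if i*i > x: return i-1' — fuel is the number of remaining range elements
def pvScanA (x : Int) : Nat → Int → Int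
  | 0, i => i - 1
  | f+1, i => if i * i > x then i - 1 else pvScanA x f (i+1)

def pvIsqrtA (x : Int) : Int :=
  if x < 0 then 0          -- Python raises ValueError here; jugglerSequence never calls it with x < 0
  else if x = 0 then 0
  else pvScanA x x.toNat 1

def pvLoopA : Nat → Int → List Int → List Int
  | 0, _, acc => acc
  | f+1, n, acc =>
    if n > 1 then
      pvLoopA f (if PySem.Int.mod n 2 = 0 then pvIsqrtA n else pvIsqrtA (n*n*n)) (acc ++ [n])
    else acc

def jugglerSequence (n : Int) : List Int := pvLoopA 1000 n [] ++ [1]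

-- ===== PORT B =====
-- binary search for the largest r with r*r ≤ x; fuel bounds hi - lo, which shrinks each step
def pvBs (x : Int) : Nat → Int → Int → Int
  | 0, lo, _ => lo
  | f+1, lo, hi =>
    if lo < hi then
      let mid := PySem.Int.floordiv (lo + hi + 1) 2
      if mid * mid ≤ x then pvBs x f mid hi else pvBs x f lo (mid - 1)
    else lo

def pvBsqrt (x : Int) : Int := pvBs x x.toNat 0 x

def pvJugB : Nat → Int → List Int
  | 0, _ => [1]
  | f+1, n =>
    if n ≤ 1 then [1]
    else n :: pvJugB f (pvBsqrt (if PySem.Int.mod n 2 = 0 then n else n*n*n))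

def jugglerSequence_alt (n : Int) : List Int := pvJugB 1000 n

-- ===== PRECONDITION & SPEC =====
def Spec_jugglerSequence (n : Int) (out : List Int) : Prop := out = jugglerSequence_alt n
instance (n : Int) (out : List Int) : Decidable (Spec_jugglerSequence n out) := by unfold Spec_jugglerSequence; infer_instance

-- ===== CLAIM (what is proved, stated in full; the proofs are below) =====
def Claim_equal_jugglerSequence : Prop := ∀ (n : Int), Dom_jugglerSequence n → Spec_jugglerSequence n (jugglerSequence n)

-- ===== LEMMAS AND PROOFS =====

def pvIsSqrt (x r : Int) : Prop := 0 ≤ r ∧ r * r ≤ x ∧ x < (r+1) * (r+1)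

theorem pvIsSqrt_uniq {x r s : Int} (hr : pvIsSqrt x r) (hs : pvIsSqrt x s) : r = s := by
  obtain ⟨hr0, hr1, hr2⟩ := hr
  obtain ⟨hs0, hs1, hs2⟩ := hs
  by_contra h
  rcases lt_or_gt_of_ne h with hlt | hlt
  · nlinarith
  · nlinarith

theorem pvScanA_ok (x : Int) (hx : 2 ≤ x) :
    ∀ (f : Nat) (i : Int), 1 ≤ i → (i-1) * (i-1) ≤ x → x + 1 ≤ i + (f : Int) →
      pvIsSqrt x (pvScanA x f i) := by
  intro f
  induction f with
  | zero =>
    intro i hi hsq hfu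
    exfalso
    push_cast at hfu
    nlinarith
  | succ f ih =>
    intro i hi hsq hfu
    by_cases h : i * i > x
    · simp only [pvScanA, if_pos h]
      refine ⟨by omega, hsq, by nlinarith⟩
    · simp only [pvScanA, if_neg h]
      push_neg at h
      refine ih (i+1) (by omega) (by simpa using h) (by push_cast at hfu ⊢; omega)

theorem pvBs_ok (x : Int) :
    ∀ (f : Nat) (lo hi : Int), 0 ≤ lo → lo ≤ hi → lo * lo ≤ x → x < (hi+1) * (hi+1) →
      hi - lo ≤ (f : Int) → pvIsSqrt x (pvBs x f lo hi) := by
  intro f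
  induction f with
  | zero =>
    intro lo hi h0 hle hl hh hfu
    have : lo = hi := by push_cast at hfu; omega
    subst this
    exact ⟨h0, hl, hh⟩
  | succ f ih =>
    intro lo hi h0 hle hl hh hfu
    by_cases h : lo < hi
    · simp only [pvBs, if_pos h]
      rw [PySem.Int.floordiv_eq_ediv_of_pos (by omega)]
      set mid := (lo + hi + 1) / 2 with hmid
      have hb1 : lo + 1 ≤ mid := by omega
      have hb2 : mid ≤ hi := by omega
      by_cases hm : mid * mid ≤ x
      · simp only [if_pos hm]
        exact ih mid hi (by omega) hb2 hm hh (by push_cast at hfu ⊢; omega)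
      · simp only [if_neg hm]
        push_neg at hm
        refine ih lo (mid - 1) h0 (by omega) hl (by simpa using hm) (by push_cast at hfu ⊢; omega)
    · simp only [pvBs, if_neg h]
      have : lo = hi := by omega
      subst this
      exact ⟨h0, hl, hh⟩

theorem pvIsqrt_agree (x : Int) (hx : 2 ≤ x) : pvIsqrtA x = pvBsqrt x := by
  have hxt : ((x.toNat : Nat) : Int) = x := Int.toNat_of_nonneg (by omega)
  have hA : pvIsSqrt x (pvIsqrtA x) := by
    unfold pvIsqrtA
    rw [if_neg (by omega), if_neg (by omega)]
    exact pvScanA_ok x hx x.toNat 1 le_rfl (by nlinarith) (by omega)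
  have hB : pvIsSqrt x (pvBsqrt x) := by
    unfold pvBsqrt
    exact pvBs_ok x x.toNat 0 x le_rfl (by omega) (by omega) (by nlinarith) (by omega)
  exact pvIsSqrt_uniq hA hB

theorem pvLoop_eq : ∀ (f : Nat) (n : Int) (acc : List Int),
    pvLoopA f n acc ++ [1] = acc ++ pvJugB f n := by
  intro f
  induction f with
  | zero => intro n acc; simp [pvLoopA, pvJugB]
  | succ f ih =>
    intro n acc
    by_cases h : n > 1
    · have h' : ¬ n ≤ 1 := by omega
      simp only [pvLoopA, pvJugB, if_pos h, if_neg h']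
      have hstep : (if PySem.Int.mod n 2 = 0 then pvIsqrtA n else pvIsqrtA (n*n*n))
          = pvBsqrt (if PySem.Int.mod n 2 = 0 then n else n*n*n) := by
        by_cases hm : PySem.Int.mod n 2 = 0
        · simp only [if_pos hm]; exact pvIsqrt_agree n (by omega)
        · simp only [if_neg hm]; exact pvIsqrt_agree (n*n*n) (by nlinarith)
      rw [hstep, ih, List.append_assoc]
      rfl
    · have h' : n ≤ 1 := by omega
      simp [pvLoopA, pvJugB, h, h']

-- ===== VERDICT (by name: the statement is the Claim_ definition above) =====
theorem jugglerSequence_spec : Claim_equal_jugglerSequence := by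
  intro n _
  unfold Spec_jugglerSequence jugglerSequence jugglerSequence_alt
  simpa using pvLoop_eq 1000 n []
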